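-- pv_equiv track=rewrite | github.com/raphael-group/LAML | problin_libs/ml.py | sets
-- ===== SOURCE A (Python) =====
-- def sets(seq_a, seq_b):
--     # get the msa
--     k = len(seq_a)
--
--     ## calculate the sets
--     s_0, s_1a, s_1b, s_2, s_3 = set(), set(), set(), set(), set()
--     for idx in range(len(seq_a)):
--         c_a, c_b = seq_a[idx], seq_b[idx]
--         if c_a == c_b:
--             if c_a == 0:
--                 s_0.add(idx)
--             else:
--                 s_2.add(idx)
--         elif c_a == 0: # then c_b != 0
--             s_1b.add(idx)
--         elif c_b == 0: # then c_a != 0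
--             s_1a.add(idx)
--         else:
--             s_3.add(idx)
--
--     assert len(s_0) + len(s_1a) + len(s_1b) + len(s_2) + len(s_3) == k
--     return [s_0, s_1a, s_1b, s_2, s_3]
-- ===== SOURCE B (Python) =====
-- def sets(seq_a, seq_b):
--     k = len(seq_a)
--     r = range(k)
--     s_0  = {i for i in r if seq_a[i] == 0 and seq_b[i] == 0}
--     s_1a = {i for i in r if seq_b[i] == 0 and seq_a[i] != 0}
--     s_1b = {i for i in r if seq_a[i] == 0 and seq_b[i] != 0}
--     s_2  = {i for i in r if seq_a[i] == seq_b[i] and seq_a[i] != 0}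
--     s_3  = {i for i in r if seq_a[i] != seq_b[i] and seq_a[i] != 0 and seq_b[i] != 0}
--     return [s_0, s_1a, s_1b, s_2, s_3]
-- ===== Notes on version B (the rewrite author's own statement) =====
-- stated objective: alternative
-- what changed: Replaces the single dispatching loop with branch-order-dependent classification by five independent mutually-exclusive set comprehensions over range(len(seq_a)), one per bucket, dropping the branch chain and the (always-true) assert.
import Mathlib
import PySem

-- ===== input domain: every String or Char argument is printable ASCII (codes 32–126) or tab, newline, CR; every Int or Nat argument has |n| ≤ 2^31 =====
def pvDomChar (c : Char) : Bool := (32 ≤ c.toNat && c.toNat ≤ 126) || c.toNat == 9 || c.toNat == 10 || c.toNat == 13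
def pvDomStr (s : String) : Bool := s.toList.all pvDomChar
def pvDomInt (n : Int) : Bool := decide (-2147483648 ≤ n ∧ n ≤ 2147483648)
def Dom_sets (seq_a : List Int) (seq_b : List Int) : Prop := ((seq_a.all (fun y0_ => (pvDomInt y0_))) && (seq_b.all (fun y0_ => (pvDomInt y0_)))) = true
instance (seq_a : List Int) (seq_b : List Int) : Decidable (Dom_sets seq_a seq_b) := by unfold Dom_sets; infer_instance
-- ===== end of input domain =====

-- B replaces A's single dispatching loop by five independent mutually-exclusive set comprehensions, one per bucket (alternative decomposition, same cost; equivalence is about the return value, no mutation involved).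


-- ===== PORT A =====
-- the for-loop over range(len(seq_a)) carrying the five sets; pyGetD is exact under Pre_ (indices in range)
def setsLoop (a b : List Int) : List Int → List Int → List Int → List Int → List Int → List Int → List Int × List Int × List Int × List Int × List Int
  | [], s0, s1a, s1b, s2, s3 => (s0, s1a, s1b, s2, s3)
  | idx :: rest, s0, s1a, s1b, s2, s3 =>
    let c_a := PySem.List.pyGetD a idx 0
    let c_b := PySem.List.pyGetD b idx 0
    if c_a == c_b then
      if c_a == 0 then setsLoop a b rest (PySem.Set.add s0 idx) s1a s1b s2 s3
      else setsLoop a b rest s0 s1a s1b (PySem.Set.add s2 idx) s3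
    else if c_a == 0 then setsLoop a b rest s0 s1a (PySem.Set.add s1b idx) s2 s3
    else if c_b == 0 then setsLoop a b rest s0 (PySem.Set.add s1a idx) s1b s2 s3
    else setsLoop a b rest s0 s1a s1b s2 (PySem.Set.add s3 idx)

def sets (seq_a : List Int) (seq_b : List Int) : List (List Int) :=
  let k := PySem.List.len seq_a
  let r := setsLoop seq_a seq_b (PySem.List.pyRange 0 (PySem.List.len seq_a) 1) [] [] [] [] []
  let s0 := r.1
  let s1a := r.2.1
  let s1b := r.2.2.1
  let s2 := r.2.2.2.1
  let s3 := r.2.2.2.2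
  -- assert (always succeeds; else-branch unreachable, proved below)
  if PySem.Set.len s0 + PySem.Set.len s1a + PySem.Set.len s1b + PySem.Set.len s2 + PySem.Set.len s3 == k
  then [s0, s1a, s1b, s2, s3] else []

-- ===== PORT B =====
def sets_alt (seq_a : List Int) (seq_b : List Int) : List (List Int) :=
  let r := PySem.List.pyRange 0 (PySem.List.len seq_a) 1
  [r.filter (fun i => PySem.List.pyGetD seq_a i 0 == 0 && PySem.List.pyGetD seq_b i 0 == 0),
   r.filter (fun i => PySem.List.pyGetD seq_b i 0 == 0 && PySem.List.pyGetD seq_a i 0 != 0),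
   r.filter (fun i => PySem.List.pyGetD seq_a i 0 == 0 && PySem.List.pyGetD seq_b i 0 != 0),
   r.filter (fun i => PySem.List.pyGetD seq_a i 0 == PySem.List.pyGetD seq_b i 0 && PySem.List.pyGetD seq_a i 0 != 0),
   r.filter (fun i => PySem.List.pyGetD seq_a i 0 != PySem.List.pyGetD seq_b i 0 && PySem.List.pyGetD seq_a i 0 != 0 && PySem.List.pyGetD seq_b i 0 != 0)]

-- ===== PRECONDITION & SPEC =====
-- Pre_ excludes exactly the inputs on which Python A raises IndexError: seq_b shorter than seq_a.
def Pre_sets (seq_a : List Int) (seq_b : List Int) : Prop := seq_a.length ≤ seq_b.length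
instance (seq_a : List Int) (seq_b : List Int) : Decidable (Pre_sets seq_a seq_b) := by unfold Pre_sets; infer_instance
def pvWitness_sets : List Int × List Int := ([0, 1, 2], [0, 2, 0])
def Spec_sets (seq_a : List Int) (seq_b : List Int) (out : List (List Int)) : Prop := out = sets_alt seq_a seq_b
instance (seq_a : List Int) (seq_b : List Int) (out : List (List Int)) : Decidable (Spec_sets seq_a seq_b out) := by unfold Spec_sets; infer_instance

-- ===== CLAIM (what is proved, stated in full; the proofs are below) =====
def Claim_equal_sets : Prop := ∀ (seq_a : List Int) (seq_b : List Int), Dom_sets seq_a seq_b → Pre_sets seq_a seq_b → Spec_sets seq_a seq_b (sets seq_a seq_b)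

-- ===== LEMMAS AND PROOFS =====

lemma pySet_add_of_not_mem (s : List Int) (x : Int) (h : x ∉ s) :
    PySem.Set.add s x = s ++ [x] := by
  simp [PySem.Set.add, PySem.Set.contains, h]

lemma setsLoop_eq (a b : List Int) (L : List Int) :
    ∀ (s0 s1a s1b s2 s3 : List Int), L.Nodup →
    (∀ x ∈ L, x ∉ s0 ∧ x ∉ s1a ∧ x ∉ s1b ∧ x ∉ s2 ∧ x ∉ s3) →
    setsLoop a b L s0 s1a s1b s2 s3 =
      (s0 ++ L.filter (fun i => PySem.List.pyGetD a i 0 == 0 && PySem.List.pyGetD b i 0 == 0),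
       s1a ++ L.filter (fun i => PySem.List.pyGetD b i 0 == 0 && PySem.List.pyGetD a i 0 != 0),
       s1b ++ L.filter (fun i => PySem.List.pyGetD a i 0 == 0 && PySem.List.pyGetD b i 0 != 0),
       s2 ++ L.filter (fun i => PySem.List.pyGetD a i 0 == PySem.List.pyGetD b i 0 && PySem.List.pyGetD a i 0 != 0),
       s3 ++ L.filter (fun i => PySem.List.pyGetD a i 0 != PySem.List.pyGetD b i 0 && PySem.List.pyGetD a i 0 != 0 && PySem.List.pyGetD b i 0 != 0)) := by
  induction L with
  | nil => intro s0 s1a s1b s2 s3 _ _; simp [setsLoop]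
  | cons idx rest ih =>
    intro s0 s1a s1b s2 s3 hnd hdisj
    obtain ⟨hi, hrest⟩ := List.nodup_cons.mp hnd
    obtain ⟨h0, h1a, h1b, h2, h3⟩ := hdisj idx (by simp)
    have hD : ∀ x ∈ rest, x ∉ s0 ∧ x ∉ s1a ∧ x ∉ s1b ∧ x ∉ s2 ∧ x ∉ s3 :=
      fun x hx => hdisj x (List.mem_cons_of_mem _ hx)
    have hne : ∀ x ∈ rest, x ≠ idx := fun x hx h => hi (h ▸ hx)
    simp only [setsLoop]
    by_cases e1 : PySem.List.pyGetD a idx 0 = PySem.List.pyGetD b idx 0 <;>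
      by_cases e2 : PySem.List.pyGetD a idx 0 = 0 <;>
      by_cases e3 : PySem.List.pyGetD b idx 0 = 0
    -- e1 e2 e3 : s0 bucket
    · rw [pySet_add_of_not_mem s0 idx h0,
        ih (s0 ++ [idx]) s1a s1b s2 s3 hrest (fun x hx =>
          ⟨by simp [(hD x hx).1, hne x hx], (hD x hx).2.1, (hD x hx).2.2.1,
            (hD x hx).2.2.2.1, (hD x hx).2.2.2.2⟩)]
      simp [e1, e3]
    · exact absurd (e1 ▸ e2) e3
    · exact absurd (e1.symm ▸ e3) e2
    -- e1 ¬e2 ¬e3 : s2 bucket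
    · rw [if_pos (by simp [e1]), if_neg (by simp [e2]),
        pySet_add_of_not_mem s2 idx h2,
        ih s0 s1a s1b (s2 ++ [idx]) s3 hrest (fun x hx =>
          ⟨(hD x hx).1, (hD x hx).2.1, (hD x hx).2.2.1,
            by simp [(hD x hx).2.2.2.1, hne x hx], (hD x hx).2.2.2.2⟩)]
      simp [e1, e3]
    -- ¬e1 e2 e3 : impossible (a=0, b=0 ⇒ a=b)
    · exact absurd (e2.trans e3.symm) e1
    -- ¬e1 e2 ¬e3 : s1b bucket
    · rw [if_neg (by simp [e1]), if_pos (by simp [e2]),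
        pySet_add_of_not_mem s1b idx h1b,
        ih s0 s1a (s1b ++ [idx]) s2 s3 hrest (fun x hx =>
          ⟨(hD x hx).1, (hD x hx).2.1, by simp [(hD x hx).2.2.1, hne x hx],
            (hD x hx).2.2.2.1, (hD x hx).2.2.2.2⟩)]
      simp [e2, e3]
    -- ¬e1 ¬e2 e3 : s1a bucket
    · rw [if_neg (by simp [e1]), if_neg (by simp [e2]), if_pos (by simp [e3]),
        pySet_add_of_not_mem s1a idx h1a,
        ih s0 (s1a ++ [idx]) s1b s2 s3 hrest (fun x hx =>
          ⟨(hD x hx).1, by simp [(hD x hx).2.1, hne x hx], (hD x hx).2.2.1,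
            (hD x hx).2.2.2.1, (hD x hx).2.2.2.2⟩)]
      simp [e2, e3]
    -- ¬e1 ¬e2 ¬e3 : s3 bucket
    · rw [if_neg (by simp [e1]), if_neg (by simp [e2]), if_neg (by simp [e3]),
        pySet_add_of_not_mem s3 idx h3,
        ih s0 s1a s1b s2 (s3 ++ [idx]) hrest (fun x hx =>
          ⟨(hD x hx).1, (hD x hx).2.1, (hD x hx).2.2.1,
            (hD x hx).2.2.2.1, by simp [(hD x hx).2.2.2.2, hne x hx]⟩)]
      simp [e1, e2, e3]

lemma filter_partition (a b : List Int) (L : List Int) :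
    (L.filter (fun i => PySem.List.pyGetD a i 0 == 0 && PySem.List.pyGetD b i 0 == 0)).length +
    (L.filter (fun i => PySem.List.pyGetD b i 0 == 0 && PySem.List.pyGetD a i 0 != 0)).length +
    (L.filter (fun i => PySem.List.pyGetD a i 0 == 0 && PySem.List.pyGetD b i 0 != 0)).length +
    (L.filter (fun i => PySem.List.pyGetD a i 0 == PySem.List.pyGetD b i 0 && PySem.List.pyGetD a i 0 != 0)).length +
    (L.filter (fun i => PySem.List.pyGetD a i 0 != PySem.List.pyGetD b i 0 && PySem.List.pyGetD a i 0 != 0 && PySem.List.pyGetD b i 0 != 0)).length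
      = L.length := by
  induction L with
  | nil => simp
  | cons idx rest ih =>
    by_cases e1 : PySem.List.pyGetD a idx 0 = PySem.List.pyGetD b idx 0 <;>
      by_cases e2 : PySem.List.pyGetD a idx 0 = 0 <;>
      by_cases e3 : PySem.List.pyGetD b idx 0 = 0 <;>
      first
        | (exfalso; omega)
        | (simp [e1, e2, e3]; omega)

-- ===== VERDICT (by name: the statement is the Claim_ definition above) =====
theorem sets_spec : Claim_equal_sets := by
  intro a b _ _
  unfold Spec_sets sets sets_alt
  rw [setsLoop_eq a b (PySem.List.pyRange 0 (PySem.List.len a) 1) [] [] [] [] []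
    (PySem.List.nodup_pyRange_one _ _) (by simp)]
  have hlen : (PySem.List.pyRange 0 (PySem.List.len a) 1).length = a.length := by
    simp [PySem.List.length_pyRange_one, PySem.List.len_eq]
  have hpart := filter_partition a b (PySem.List.pyRange 0 (PySem.List.len a) 1)
  simp only [List.nil_append]
  rw [if_pos (by
    rw [beq_iff_eq]
    simp only [PySem.Set.len, PySem.List.len_eq] at hpart hlen ⊢
    omega)]
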